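-- pv_equiv track=rewrite | github.com/V1olanc1/lab2 | main.py | validate_checksum
-- ===== SOURCE A (Python) =====
-- def validate_checksum(snils: str) -> bool:
--     """Проверка контрольной суммы СНИЛС."""
--     if not snils.isdigit() or len(snils) != 11:
--         return False
--
--     number_part = snils[:9]
--     checksum = int(snils[9:])
--
--     total = 0
--     for i, digit in enumerate(number_part, start=1):
--         total += int(digit) * (10 - i)
--
--     if total < 100:
--         return checksum == total
--     elif total == 100 or total == 101:
--         return checksum == 0
--     else:
--         remainder = total % 101
--         if remainder == 100:
--             return checksum == 0
--         else:
--             return checksum == remainder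
-- ===== SOURCE B (Python) =====
-- def validate_checksum(snils: str) -> bool:
--     """Проверка контрольной суммы СНИЛС (через накопленные префиксные суммы)."""
--     if not snils.isdigit() or len(snils) != 11:
--         return False
--     running = 0
--     total = 0
--     for ch in snils[:9]:
--         running += ord(ch) - 48
--         total += running
--     return int(snils[9:]) == total % 101 % 100
-- ===== Notes on version B (the rewrite author's own statement) =====
-- stated objective: simpler
-- what changed: B replaces the weighted sum (digit * (10-i)) by a weight-free cumulative-prefix-sum pass (total = sum of running prefix sums, equal because each digit is counted once per suffix position) and collapses A's four-way if/elif cascade into the single closed-form rule total % 101 % 100.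
import Mathlib
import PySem

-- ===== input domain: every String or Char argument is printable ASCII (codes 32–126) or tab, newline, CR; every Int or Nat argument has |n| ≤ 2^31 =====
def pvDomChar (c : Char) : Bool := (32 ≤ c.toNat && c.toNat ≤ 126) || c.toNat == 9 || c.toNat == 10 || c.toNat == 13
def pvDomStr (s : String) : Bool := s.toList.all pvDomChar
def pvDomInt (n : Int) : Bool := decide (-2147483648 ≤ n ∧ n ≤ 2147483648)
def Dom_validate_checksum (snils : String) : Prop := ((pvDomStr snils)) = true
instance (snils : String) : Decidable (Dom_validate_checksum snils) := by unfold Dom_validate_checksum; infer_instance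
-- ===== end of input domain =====

-- B replaces A's weighted sum and four-branch checksum cascade by a weight-free
-- cumulative-prefix-sum pass and the single closed-form rule total % 101 % 100: simpler decomposition.


-- ===== PORT A =====
def validate_checksum (snils : String) : Bool :=
  if !PySem.Str.strIsdigit snils || PySem.Str.len snils ≠ 11 then false
  else
    let number_part := PySem.Str.slice snils none (some 9)
    -- int(snils[9:]) cannot raise under the guard (all-digit, length 11), so ofStr? is some here
    let checksum := (PySem.Int.ofStr? (PySem.Str.slice snils (some 9) none)).getD 0
    let total := (PySem.List.enumerate number_part.toList 1).foldl
      (fun acc p => acc + (PySem.Int.ofChars? [p.2]).getD 0 * (10 - p.1)) 0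
    if total < 100 then checksum == total
    else if total == 100 || total == 101 then checksum == 0
    else
      let remainder := PySem.Int.mod total 101
      if remainder == 100 then checksum == 0 else checksum == remainder

-- ===== PORT B =====
def validate_checksum_alt (snils : String) : Bool :=
  if !PySem.Str.strIsdigit snils || PySem.Str.len snils ≠ 11 then false
  else
    -- one pass over the first nine digits: state = (running prefix sum, total of prefix sums)
    let st := (PySem.Str.slice snils none (some 9)).toList.foldl
      (fun (p : Int × Int) c =>
        (p.1 + ((c.toNat : Int) - 48), p.2 + (p.1 + ((c.toNat : Int) - 48)))) (0, 0)
    -- int(snils[9:]) cannot raise under the guard (all-digit, length 11), so ofStr? is some here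
    (PySem.Int.ofStr? (PySem.Str.slice snils (some 9) none)).getD 0
      == PySem.Int.mod (PySem.Int.mod st.2 101) 100

-- ===== PRECONDITION & SPEC =====
def Spec_validate_checksum (snils : String) (out : Bool) : Prop := out = validate_checksum_alt snils
instance (snils : String) (out : Bool) : Decidable (Spec_validate_checksum snils out) := by unfold Spec_validate_checksum; infer_instance

-- ===== CLAIM (what is proved, stated in full; the proofs are below) =====
def Claim_equal_validate_checksum : Prop := ∀ (snils : String), Dom_validate_checksum snils → Spec_validate_checksum snils (validate_checksum snils)

-- ===== LEMMAS AND PROOFS =====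

lemma char_eq_of_toNat (c d : Char) (h : c.val.toNat = d.val.toNat) : c = d := by
  apply Char.ext; exact UInt32.toNat_inj.mp h

lemma digit_cases (c : Char) (h : PySem.Chars.isdigit c = true) :
    c = '0' ∨ c = '1' ∨ c = '2' ∨ c = '3' ∨ c = '4' ∨ c = '5' ∨ c = '6' ∨ c = '7' ∨ c = '8' ∨ c = '9' := by
  simp only [PySem.Chars.isdigit, Bool.and_eq_true, decide_eq_true_eq] at h
  obtain ⟨h1, h2⟩ := h
  rw [Char.le_def] at h1 h2
  have h1' : 48 ≤ c.val.toNat := h1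
  have h2' : c.val.toNat ≤ 57 := h2
  have hd : c.val.toNat = 48 ∨ c.val.toNat = 49 ∨ c.val.toNat = 50 ∨ c.val.toNat = 51 ∨ c.val.toNat = 52 ∨
      c.val.toNat = 53 ∨ c.val.toNat = 54 ∨ c.val.toNat = 55 ∨ c.val.toNat = 56 ∨ c.val.toNat = 57 := by omega
  rcases hd with h|h|h|h|h|h|h|h|h|h <;>
    [exact Or.inl (char_eq_of_toNat _ _ (by rw [h]; decide));
     exact Or.inr (Or.inl (char_eq_of_toNat _ _ (by rw [h]; decide)));
     exact Or.inr (Or.inr (Or.inl (char_eq_of_toNat _ _ (by rw [h]; decide))));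
     exact Or.inr (Or.inr (Or.inr (Or.inl (char_eq_of_toNat _ _ (by rw [h]; decide)))));
     exact Or.inr (Or.inr (Or.inr (Or.inr (Or.inl (char_eq_of_toNat _ _ (by rw [h]; decide))))));
     exact Or.inr (Or.inr (Or.inr (Or.inr (Or.inr (Or.inl (char_eq_of_toNat _ _ (by rw [h]; decide)))))));
     exact Or.inr (Or.inr (Or.inr (Or.inr (Or.inr (Or.inr (Or.inl (char_eq_of_toNat _ _ (by rw [h]; decide))))))));
     exact Or.inr (Or.inr (Or.inr (Or.inr (Or.inr (Or.inr (Or.inr (Or.inl (char_eq_of_toNat _ _ (by rw [h]; decide)))))))));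
     exact Or.inr (Or.inr (Or.inr (Or.inr (Or.inr (Or.inr (Or.inr (Or.inr (Or.inl (char_eq_of_toNat _ _ (by rw [h]; decide))))))))));
     exact Or.inr (Or.inr (Or.inr (Or.inr (Or.inr (Or.inr (Or.inr (Or.inr (Or.inr (char_eq_of_toNat _ _ (by rw [h]; decide))))))))))]

lemma ofChars_one (c : Char) (h : PySem.Chars.isdigit c = true) :
    PySem.Int.ofChars? [c] = some ((c.toNat : Int) - 48) := by
  rcases digit_cases c h with h|h|h|h|h|h|h|h|h|h <;> subst h <;> decide

lemma digit_val_bounds (c : Char) (h : PySem.Chars.isdigit c = true) :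
    0 ≤ (c.toNat : Int) - 48 ∧ (c.toNat : Int) - 48 ≤ 9 := by
  rcases digit_cases c h with h|h|h|h|h|h|h|h|h|h <;> subst h <;> decide

-- A's four-way branch cascade computes 'checksum == t % 101 % 100' (B's closed form)
lemma branch_eq (t c : Int) (ht : 0 ≤ t) :
    (if t < 100 then c == t
     else if t = 100 ∨ t = 101 then c == 0
     else if t % 101 = 100 then c == 0 else c == t % 101)
    = (c == t % 101 % 100) := by
  split_ifs <;> (congr 1; omega)

lemma len11_cases (l : List Char) (h : l.length = 11) :
    ∃ c0 c1 c2 c3 c4 c5 c6 c7 c8 c9 c10,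
      l = [c0, c1, c2, c3, c4, c5, c6, c7, c8, c9, c10] := by
  match l, h with
  | [c0, c1, c2, c3, c4, c5, c6, c7, c8, c9, c10], _ =>
    exact ⟨c0, c1, c2, c3, c4, c5, c6, c7, c8, c9, c10, rfl⟩

-- ===== VERDICT (by name: the statement is the Claim_ definition above) =====
theorem validate_checksum_spec : Claim_equal_validate_checksum := by
  intro s _
  unfold Spec_validate_checksum validate_checksum validate_checksum_alt
  by_cases hd : PySem.Chars.strIsdigit s.toList = true
  · by_cases hlen : s.toList.length = 11
    · obtain ⟨c0,c1,c2,c3,c4,c5,c6,c7,c8,c9,c10,hL⟩ := len11_cases s.toList hlen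
      have hall : ∀ c ∈ s.toList, PySem.Chars.isdigit c = true := by
        simp only [PySem.Chars.strIsdigit, Bool.and_eq_true, List.all_eq_true] at hd
        exact fun c hc => hd.2 c hc
      rw [hL] at hall
      have h0 := hall c0 (by simp); have h1 := hall c1 (by simp); have h2 := hall c2 (by simp)
      have h3 := hall c3 (by simp); have h4 := hall c4 (by simp); have h5 := hall c5 (by simp)
      have h6 := hall c6 (by simp); have h7 := hall c7 (by simp); have h8 := hall c8 (by simp)
      simp [PySem.Str.strIsdigit, PySem.Str.len, PySem.Str.slice, hL,
        PySem.List.enumerate, List.foldl,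
        ofChars_one c0 h0, ofChars_one c1 h1, ofChars_one c2 h2, ofChars_one c3 h3,
        ofChars_one c4 h4, ofChars_one c5 h5, ofChars_one c6 h6, ofChars_one c7 h7,
        ofChars_one c8 h8, PySem.List.slice]
      have hd' : PySem.Chars.strIsdigit [c0,c1,c2,c3,c4,c5,c6,c7,c8,c9,c10] = true := hL ▸ hd
      have b0 := digit_val_bounds c0 h0; have b1 := digit_val_bounds c1 h1
      have b2 := digit_val_bounds c2 h2; have b3 := digit_val_bounds c3 h3
      have b4 := digit_val_bounds c4 h4; have b5 := digit_val_bounds c5 h5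
      have b6 := digit_val_bounds c6 h6; have b7 := digit_val_bounds c7 h7
      have b8 := digit_val_bounds c8 h8
      rw [hd', branch_eq _ _ (by omega)]
      simp only [Bool.true_and]
      congr 2 <;> ring_nf
    · have hne : ((s.length : Int) ≠ 11) := by
        simp only [String.length_toList] at hlen ⊢; exact_mod_cast hlen
      simp [PySem.Str.strIsdigit, PySem.Str.len, hd, hne, String.length_toList]
  · simp only [Bool.not_eq_true] at hd
    simp [PySem.Str.strIsdigit, hd]
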